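-- pv_equiv track=rewrite | github.com/skrashevich/microWakeWord-Trainer-Nvidia-Docker | recorder_server.py | _compute_new_lines
-- ===== SOURCE A (Python) =====
-- from typing import Dict, Any, List, Optional, Tuple
--
-- def _compute_new_lines(prev_tail: List[str], new_tail: List[str]) -> List[str]:
--     """
--     Given previous and current tail snapshots, return only the newly-added lines.
--     Works even if the tail window shifts.
--     """
--     if not prev_tail:
--         return new_tail
--
--     # Try to find the largest suffix of prev_tail that matches a prefix of new_tail
--     max_k = min(len(prev_tail), len(new_tail))
--     for k in range(max_k, 0, -1):
--         if prev_tail[-k:] == new_tail[:k]: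
--             return new_tail[k:]
--
--     # If no overlap, just return full new_tail (probably truncation or big jump)
--     return new_tail
-- ===== SOURCE B (Python) =====
-- from typing import List
--
--
-- def _compute_new_lines(prev_tail: List[str], new_tail: List[str]) -> List[str]:
--     # KMP prefix function over new_tail + [None] + prev_tail (None is a
--     # sentinel no line equals); its final value k is the length of the longest
--     # suffix of prev_tail that is also a prefix of new_tail, computed in O(n)
--     # instead of trying every overlap length with slice comparisons.
--     seq = new_tail + [None] + prev_tail
--     pi = [0] * len(seq)
--     k = 0
--     for i in range(1, len(seq)):
--         while k > 0 and seq[i] != seq[k]: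
--             k = pi[k - 1]
--         if seq[i] == seq[k]:
--             k += 1
--         pi[i] = k
--     return new_tail[k:]
-- ===== Notes on version B (the rewrite author's own statement) =====
-- stated objective: faster
-- what changed: Replaces A's downward scan over every candidate overlap length with slice comparisons by a single KMP prefix-function pass over new_tail + [None] + prev_tail whose final value is the longest suffix-of-prev / prefix-of-new overlap.
import Mathlib
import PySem

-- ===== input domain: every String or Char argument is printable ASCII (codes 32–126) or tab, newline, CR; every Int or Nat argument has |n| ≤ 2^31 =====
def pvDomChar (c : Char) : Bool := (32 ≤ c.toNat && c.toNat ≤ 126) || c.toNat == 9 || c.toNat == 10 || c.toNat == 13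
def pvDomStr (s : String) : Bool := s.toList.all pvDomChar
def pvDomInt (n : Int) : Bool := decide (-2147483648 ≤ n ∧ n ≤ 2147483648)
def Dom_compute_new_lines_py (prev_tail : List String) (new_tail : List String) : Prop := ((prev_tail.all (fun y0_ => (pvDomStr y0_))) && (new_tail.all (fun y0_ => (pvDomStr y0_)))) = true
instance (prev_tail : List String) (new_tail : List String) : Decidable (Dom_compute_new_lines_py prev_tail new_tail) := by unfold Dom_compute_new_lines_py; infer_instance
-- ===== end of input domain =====

-- B replaces A's downward scan over all candidate overlap lengths (slice comparisons)
-- by one KMP prefix-function pass over new_tail ++ [None] ++ prev_tail (objective: faster,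
-- measured).


-- ===== PORT A =====
-- 'for k in range(max_k, 0, -1): if prev_tail[-k:] == new_tail[:k]: return new_tail[k:]'
def cnlLoopA (prev_tail new_tail : List String) : List Int → List String
  | [] => new_tail
  | k :: ks =>
      if PySem.List.slice prev_tail (some (-k)) none = PySem.List.slice new_tail none (some k)
      then PySem.List.slice new_tail (some k) none
      else cnlLoopA prev_tail new_tail ks

def compute_new_lines_py (prev_tail : List String) (new_tail : List String) : List String :=
  if prev_tail = [] then new_tail
  else
    let max_k : Int := min (prev_tail.length : Int) (new_tail.length : Int)
    cnlLoopA prev_tail new_tail (PySem.List.pyRange max_k 0 (-1))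

-- ===== PORT B =====
-- 'while k > 0 and seq[i] != seq[k]: k = pi[k - 1]'
-- fuel = k: the loop strictly decreases k (pi[k-1] < k, proved below), so fuel k is exact.
-- List.getD is exact here: every index read is proved in range (k - 1 < |pis|, k < |seq|).
def kmpWhile (seq : List (Option String)) (pis : List Nat) (x : Option String) :
    Nat → Nat → Nat
  | 0, k => k
  | fuel + 1, k =>
      if k > 0 ∧ x ≠ seq.getD k none then kmpWhile seq pis x fuel (pis.getD (k - 1) 0)
      else k

-- 'for i in range(1, len(seq)): … ; pi[i] = k' — pis is the assigned prefix pi[0..i-1]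
-- (Python's remaining slots stay 0 and are never read before assignment).
def kmpLoop (seq : List (Option String)) : List (Option String) → List Nat → Nat → Nat
  | [], _, k => k
  | x :: rest, pis, k =>
      let k1 := kmpWhile seq pis x k k
      let k2 := if x = seq.getD k1 none then k1 + 1 else k1
      kmpLoop seq rest (pis ++ [k2]) k2

def compute_new_lines_py_alt (prev_tail : List String) (new_tail : List String) : List String :=
  let seq : List (Option String) := new_tail.map some ++ none :: prev_tail.map some
  let k := kmpLoop seq seq.tail [0] 0
  new_tail.drop k


def Spec_compute_new_lines_py (prev_tail : List String) (new_tail : List String) (out : List String) : Prop := out = compute_new_lines_py_alt prev_tail new_tail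
instance (prev_tail : List String) (new_tail : List String) (out : List String) : Decidable (Spec_compute_new_lines_py prev_tail new_tail out) := by unfold Spec_compute_new_lines_py; infer_instance

-- ===== CLAIM (what is proved, stated in full; the proofs are below) =====
def Claim_equal_compute_new_lines_py : Prop := ∀ (prev_tail : List String) (new_tail : List String), Dom_compute_new_lines_py prev_tail new_tail → Spec_compute_new_lines_py prev_tail new_tail (compute_new_lines_py prev_tail new_tail)

-- ===== LEMMAS AND PROOFS =====

-- the combined sequence B's KMP runs on
def cnlSeq (prev_tail new_tail : List String) : List (Option String) :=
  new_tail.map some ++ none :: prev_tail.map some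

-- border test: the length-k prefix equals the length-k suffix
def isBord (p : List (Option String)) (k : Nat) : Bool :=
  p.take k == p.drop (p.length - k)

-- largest k ≤ n with isBord p k
def mbAux (p : List (Option String)) : Nat → Nat
  | 0 => 0
  | k + 1 => if isBord p (k + 1) then k + 1 else mbAux p k

-- longest proper border of p
def maxBorder (p : List (Option String)) : Nat := mbAux p (p.length - 1)

-- largest k ≤ m with prev's length-k suffix = new's length-k prefix
def bestK (prev_tail new_tail : List String) : Nat → Nat
  | 0 => 0
  | k + 1 =>
      if new_tail.take (k + 1) = prev_tail.drop (prev_tail.length - (k + 1)) then k + 1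
      else bestK prev_tail new_tail k

lemma isBord_zero (p : List (Option String)) : isBord p 0 = true := by
  simp [isBord]

lemma mbAux_le (p : List (Option String)) : ∀ n, mbAux p n ≤ n := by
  intro n; induction n with
  | zero => simp [mbAux]
  | succ k ih => simp only [mbAux]; split <;> omega

lemma mbAux_bord (p : List (Option String)) : ∀ n, isBord p (mbAux p n) = true := by
  intro n; induction n with
  | zero => simp [mbAux, isBord_zero]
  | succ k ih =>
      simp only [mbAux]; split
      · assumption
      · exact ih

lemma mbAux_ge (p : List (Option String)) : ∀ n j, isBord p j = true → j ≤ n → j ≤ mbAux p n := by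
  intro n; induction n with
  | zero => intro j _ h; omega
  | succ k ih =>
      intro j hb hj
      simp only [mbAux]; split
      · omega
      · rcases Nat.lt_or_ge j (k + 1) with h | h
        · exact ih j hb (by omega)
        · have : j = k + 1 := by omega
          subst this; simp_all

lemma maxBorder_eq_of (q : List (Option String)) (m : Nat) (hq : q ≠ [])
    (hb : isBord q m = true) (hm : m < q.length)
    (hmax : ∀ j, isBord q j = true → j < q.length → j ≤ m) : maxBorder q = m := by
  have hlen : 0 < q.length := List.length_pos_iff.mpr hq
  have h1 : maxBorder q ≤ m := by
    apply hmax
    · exact mbAux_bord q _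
    · have := mbAux_le q (q.length - 1)
      unfold maxBorder
      omega
  have h2 : m ≤ maxBorder q := mbAux_ge q _ m hb (by omega)
  omega

-- border of a border: for j ≤ k ≤ |p| with k a border, j is a border of p iff of p.take k
lemma chain (p : List (Option String)) (j k : Nat) (hjk : j ≤ k) (hk : k ≤ p.length)
    (hb : isBord p k = true) : isBord p j = isBord (p.take k) j := by
  rw [isBord, isBord] at *
  rw [beq_iff_eq] at hb
  have hlen : (p.take k).length = k := by simp [hk]
  have ht : (p.take k).take j = p.take j := by
    rw [List.take_take]; congr 1; omega
  have hd : (p.take k).drop ((p.take k).length - j) = p.drop (p.length - j) := by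
    rw [hlen, hb, List.drop_drop]
    congr 1; omega
  rw [ht, hd]

-- extension: a nonzero border of p ++ [x] is a border of p whose next element matches x
lemma ext_bord (p : List (Option String)) (x : Option String) (j : Nat) (hj : j < p.length) :
    (isBord (p ++ [x]) (j + 1) = true) ↔ (isBord p j = true ∧ p.getD j none = x) := by
  have hget : p.getD j none = p[j] := by
    rw [List.getD_eq_getElem?_getD, List.getElem?_eq_getElem hj]; rfl
  have htake : (p ++ [x]).take (j + 1) = p.take j ++ [p[j]] := by
    rw [List.take_append_of_le_length (by omega), List.take_add_one,
        List.getElem?_eq_getElem hj]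
    rfl
  have hdrop : (p ++ [x]).drop ((p ++ [x]).length - (j + 1)) = p.drop (p.length - j) ++ [x] := by
    have h1 : (p ++ [x]).length - (j + 1) = p.length - j := by simp
    rw [h1, List.drop_append_of_le_length (by omega)]
  rw [isBord, isBord, beq_iff_eq, beq_iff_eq, htake, hdrop, hget]
  constructor
  · intro he
    have hlen : (p.take j).length = (p.drop (p.length - j)).length := by simp; omega
    obtain ⟨h1, h2⟩ := List.append_inj he hlen
    exact ⟨h1, by simpa using h2⟩
  · rintro ⟨h1, h2⟩
    rw [h1, h2]

-- after the while-loop stops, the extension test yields the longest border of p ++ [x]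
lemma term (p : List (Option String)) (x : Option String) (k : Nat)
    (hb : isBord p k = true) (hkp : k < p.length)
    (hmax : ∀ j, isBord p j = true → j < p.length → p.getD j none = x → j ≤ k)
    (hstop : k = 0 ∨ p.getD k none = x) :
    (if x = p.getD k none then k + 1 else k) = maxBorder (p ++ [x]) := by
  have hq : (p ++ [x] : List (Option String)) ≠ [] := by simp
  by_cases hx : x = p.getD k none
  · rw [if_pos hx]
    symm
    apply maxBorder_eq_of _ _ hq ((ext_bord p x k hkp).mpr ⟨hb, hx.symm⟩) (by simp; omega)
    intro j' hbj' hj'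
    cases j' with
    | zero => omega
    | succ j =>
        have hjp : j < p.length := by simp at hj'; omega
        obtain ⟨h1, h2⟩ := (ext_bord p x j hjp).mp hbj'
        have := hmax j h1 hjp h2
        omega
  · rw [if_neg hx]
    have hk0 : k = 0 := by
      rcases hstop with h | h
      · exact h
      · exact absurd h.symm hx
    subst hk0
    symm
    apply maxBorder_eq_of _ _ hq (isBord_zero _) (by simp)
    intro j' hbj' hj'
    cases j' with
    | zero => omega
    | succ j =>
        have hjp : j < p.length := by simp at hj'; omega
        obtain ⟨h1, h2⟩ := (ext_bord p x j hjp).mp hbj'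
        have hj0 : j ≤ 0 := hmax j h1 hjp h2
        have : j = 0 := by omega
        subst this
        exact absurd h2.symm hx

-- the 'while' descent followed by the extension test computes the next prefix-function value
lemma desc (p seq : List (Option String)) (pis : List Nat) (x : Option String)
    (hget : ∀ j, j < p.length → seq.getD j none = p.getD j none)
    (hpi : ∀ j, j < p.length → pis.getD j 0 = maxBorder (p.take (j + 1))) :
    ∀ fuel k, k ≤ fuel → isBord p k = true → k < p.length →
    (∀ j, isBord p j = true → j < p.length → p.getD j none = x → j ≤ k) →
    (if x = seq.getD (kmpWhile seq pis x fuel k) none then kmpWhile seq pis x fuel k + 1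
     else kmpWhile seq pis x fuel k) = maxBorder (p ++ [x]) := by
  intro fuel
  induction fuel with
  | zero =>
      intro k hk hb hkp hmax
      have hk0 : k = 0 := by omega
      subst hk0
      simp only [kmpWhile]
      rw [hget 0 hkp]
      exact term p x 0 hb hkp hmax (Or.inl rfl)
  | succ fuel ih =>
      intro k hk hb hkp hmax
      by_cases hc : k > 0 ∧ x ≠ seq.getD k none
      · rw [show kmpWhile seq pis x (fuel + 1) k
              = kmpWhile seq pis x fuel (pis.getD (k - 1) 0) from by
            simp only [kmpWhile]; rw [if_pos hc]]
        obtain ⟨hkpos, hne⟩ := hc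
        have hxk : x ≠ p.getD k none := by rw [← hget k hkp]; exact hne
        have hpieq : pis.getD (k - 1) 0 = maxBorder (p.take k) := by
          have h := hpi (k - 1) (by omega)
          rwa [show k - 1 + 1 = k from by omega] at h
        rw [hpieq]
        have htklen : (p.take k).length = k := by simp; omega
        have hk2le : maxBorder (p.take k) ≤ k - 1 := by
          have := mbAux_le (p.take k) ((p.take k).length - 1)
          unfold maxBorder
          omega
        have hbord2 : isBord p (maxBorder (p.take k)) = true := by
          rw [chain p (maxBorder (p.take k)) k (by omega) (by omega) hb]
          exact mbAux_bord _ _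
        apply ih (maxBorder (p.take k)) (by omega) hbord2 (by omega)
        intro j hbj hjp hjx
        have hjk : j ≤ k := hmax j hbj hjp hjx
        have hjlt : j < k := by
          rcases Nat.lt_or_ge j k with h | h
          · exact h
          · exfalso
            have : j = k := by omega
            subst this
            exact hxk hjx.symm
        have hbtj : isBord (p.take k) j = true := by
          rw [← chain p j k (by omega) (by omega) hb]
          exact hbj
        have := mbAux_ge (p.take k) ((p.take k).length - 1) j hbtj (by omega)
        unfold maxBorder
        omega
      · rw [show kmpWhile seq pis x (fuel + 1) k = k from by
            simp only [kmpWhile]; rw [if_neg hc]]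
        rw [hget k hkp]
        apply term p x k hb hkp hmax
        push_neg at hc
        rcases Nat.eq_zero_or_pos k with h | h
        · exact Or.inl h
        · right
          have := hc h
          rw [hget k hkp] at this
          exact this.symm

-- the main loop maintains 'k = longest proper border of the processed prefix'
lemma kmpInv (seq : List (Option String)) :
    ∀ d i, d = seq.length - i → 1 ≤ i → i ≤ seq.length →
    kmpLoop seq (seq.drop i) ((List.range i).map (fun j => maxBorder (seq.take (j + 1))))
      (maxBorder (seq.take i)) = maxBorder seq := by
  intro d
  induction d with
  | zero =>
      intro i hd h1 h2
      have : i = seq.length := by omega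
      subst this
      rw [List.drop_length, List.take_of_length_le (le_refl _)]
      rfl
  | succ d ih =>
      intro i hd h1 h2
      have hi : i < seq.length := by omega
      rw [List.drop_eq_getElem_cons hi]
      simp only [kmpLoop]
      have hplen : (seq.take i).length = i := by simp; omega
      have hmb : maxBorder (seq.take i) < i := by
        have := mbAux_le (seq.take i) ((seq.take i).length - 1)
        unfold maxBorder
        omega
      have hstep := desc (seq.take i) seq ((List.range i).map (fun j => maxBorder (seq.take (j + 1)))) seq[i]
        (by
          intro j hj
          rw [hplen] at hj
          rw [List.getD_eq_getElem?_getD, List.getD_eq_getElem?_getD,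
              List.getElem?_take_of_lt hj])
        (by
          intro j hj
          rw [hplen] at hj
          rw [List.getD_eq_getElem?_getD, List.getElem?_map, List.getElem?_range hj]
          simp only [Option.map_some, Option.getD_some]
          congr 1
          rw [List.take_take]
          congr 1
          omega)
        (maxBorder (seq.take i)) (maxBorder (seq.take i)) (le_refl _)
        (mbAux_bord _ _) (by omega)
        (by
          intro j hbj hjp _
          rw [hplen] at hjp
          have := mbAux_ge (seq.take i) ((seq.take i).length - 1) j hbj (by omega)
          unfold maxBorder
          omega)
      have hext : seq.take i ++ [seq[i]] = seq.take (i + 1) := by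
        rw [List.take_add_one, List.getElem?_eq_getElem hi]
        rfl
      rw [hext] at hstep
      rw [hstep]
      have hrange : (List.range (i + 1)).map (fun j => maxBorder (seq.take (j + 1)))
          = (List.range i).map (fun j => maxBorder (seq.take (j + 1))) ++ [maxBorder (seq.take (i + 1))] := by
        rw [List.range_succ, List.map_append]
        rfl
      rw [← hrange]
      exact ih (i + 1) (by omega) (by omega) (by omega)

-- A's countdown loop returns new_tail minus the largest matching overlap
lemma loopA_eq_bestK (prev new_tail : List String) : ∀ (m : Nat),
    m ≤ prev.length → m ≤ new_tail.length →
    cnlLoopA prev new_tail (PySem.List.pyRange (m : Int) 0 (-1))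
      = new_tail.drop (bestK prev new_tail m) := by
  intro m
  induction m with
  | zero =>
      intro _ _
      rw [PySem.List.pyRange_neg_one_eq_nil (by omega)]
      simp [cnlLoopA, bestK]
  | succ k ih =>
      intro hp hn
      have hk1 : ((k + 1 : Nat) : Int) = (k : Int) + 1 := by push_cast; ring
      rw [hk1, PySem.List.pyRange_neg_one_cons (by omega),
          show ((k : Int) + 1 - 1) = (k : Int) from by ring]
      have hA1 : PySem.List.slice prev (some (-((k : Int) + 1))) none
          = prev.drop (prev.length - (k + 1)) := by
        rw [show -((k : Int) + 1) = -(((k + 1 : Nat)) : Int) from by push_cast; ring,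
            PySem.List.slice_from_neg_natCast prev (k + 1) (by omega)]
      have hA2 : PySem.List.slice new_tail none (some ((k : Int) + 1)) = new_tail.take (k + 1) := by
        rw [← hk1, PySem.List.slice_to_natCast]
      have hA3 : PySem.List.slice new_tail (some ((k : Int) + 1)) none = new_tail.drop (k + 1) := by
        rw [← hk1, PySem.List.slice_from_natCast]
      rw [cnlLoopA, hA1, hA2, hA3]
      simp only [bestK]
      by_cases hmatch : new_tail.take (k + 1) = prev.drop (prev.length - (k + 1))
      · rw [if_pos hmatch.symm, if_pos hmatch]
      · rw [if_neg (fun h => hmatch h.symm), if_neg hmatch, ih (by omega) (by omega)]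

lemma cnlSeq_length (prev new_tail : List String) :
    (cnlSeq prev new_tail).length = new_tail.length + 1 + prev.length := by
  simp [cnlSeq]
  omega

lemma count_none_map (l : List String) : (l.map some).count (none : Option String) = 0 := by
  simp [List.count_eq_zero]

lemma count_none_take_map (l : List String) (n : Nat) :
    ((l.map some).take n).count (none : Option String) = 0 := by
  apply List.count_eq_zero.mpr
  intro hm
  have := List.mem_of_mem_take hm
  simp at this

lemma count_none_drop_map (l : List String) (n : Nat) :
    ((l.map some).drop n).count (none : Option String) = 0 := by
  apply List.count_eq_zero.mpr
  intro hm
  have := List.mem_of_mem_drop hm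
  simp at this

-- first occurrence of the sentinel in A ++ none :: B when A is sentinel-free
lemma idxOf_sentinel (A B : List (Option String)) (h : (none : Option String) ∉ A) :
    (A ++ none :: B).idxOf (none : Option String) = A.length := by
  rw [List.idxOf_append_of_notMem h]
  simp

-- characterisation of the borders of the sentinel-joined sequence
lemma bord_seq_iff (prev new_tail : List String) (k : Nat)
    (hk : k < (cnlSeq prev new_tail).length) :
    isBord (cnlSeq prev new_tail) k = true ↔
      k ≤ new_tail.length ∧ k ≤ prev.length ∧
        new_tail.take k = prev.drop (prev.length - k) := by
  have hlen := cnlSeq_length prev new_tail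
  have hnn : (none : Option String) ∉ new_tail.map some := by simp
  have htake_le : k ≤ new_tail.length →
      (cnlSeq prev new_tail).take k = (new_tail.take k).map some := by
    intro h
    unfold cnlSeq
    rw [List.take_append_of_le_length (by simpa using h), List.map_take]
  have hdrop_le : k ≤ prev.length →
      (cnlSeq prev new_tail).drop ((cnlSeq prev new_tail).length - k)
        = (prev.drop (prev.length - k)).map some := by
    intro h
    rw [hlen]
    unfold cnlSeq
    rw [List.drop_append]
    rw [List.drop_of_length_le (by simp; omega)]
    rw [show new_tail.length + 1 + prev.length - k - (new_tail.map some).length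
          = (prev.length - k) + 1 from by simp; omega]
    simp [List.map_drop]
  have htake_gt : new_tail.length < k →
      (cnlSeq prev new_tail).take k
        = new_tail.map some ++ none :: (prev.map some).take (k - new_tail.length - 1) := by
    intro h
    unfold cnlSeq
    rw [List.take_append, List.take_of_length_le (by simp; omega)]
    congr 1
    rw [show k - (new_tail.map some).length = (k - new_tail.length - 1) + 1 from by simp; omega]
    rfl
  have hdrop_gt : prev.length < k →
      (cnlSeq prev new_tail).drop ((cnlSeq prev new_tail).length - k)
        = (new_tail.map some).drop ((cnlSeq prev new_tail).length - k) ++ none :: prev.map some := by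
    intro h
    rw [hlen]
    unfold cnlSeq
    rw [List.drop_append_of_le_length (by simp; omega)]
  constructor
  · intro hb
    rw [isBord, beq_iff_eq] at hb
    have hln : k ≤ new_tail.length := by
      by_contra hgt
      push_neg at hgt
      have h1 := htake_gt hgt
      by_cases hpl : k ≤ prev.length
      · -- prefix has a sentinel, suffix has none: count mismatch
        have h2 := hdrop_le hpl
        rw [h1, h2] at hb
        have hc := congrArg (List.count (none : Option String)) hb
        simp [List.count_append, count_none_map, count_none_take_map,
              count_none_drop_map] at hc
      · -- both contain the sentinel: its position forces k = full length
        push_neg at hpl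
        have h2 := hdrop_gt hpl
        rw [h1, h2] at hb
        have := congrArg (List.idxOf (none : Option String)) hb
        rw [idxOf_sentinel _ _ hnn, idxOf_sentinel _ _ (fun hm => by have := List.mem_of_mem_drop hm; simp at this)] at this
        simp at this
        omega
    have hlp : k ≤ prev.length := by
      by_contra hgt
      push_neg at hgt
      have h1 := htake_le hln
      have h2 := hdrop_gt hgt
      rw [h1, h2] at hb
      have hc := congrArg (List.count (none : Option String)) hb
      simp [List.count_append, count_none_map, count_none_take_map,
            count_none_drop_map] at hc
    refine ⟨hln, hlp, ?_⟩
    rw [htake_le hln, hdrop_le hlp] at hb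
    exact List.map_injective_iff.mpr (Option.some_injective _) hb
  · rintro ⟨hln, hlp, hmatch⟩
    rw [isBord, beq_iff_eq, htake_le hln, hdrop_le hlp, hmatch]

lemma bestK_le (prev new_tail : List String) : ∀ m, bestK prev new_tail m ≤ m := by
  intro m; induction m with
  | zero => simp [bestK]
  | succ k ih => simp only [bestK]; split <;> omega

lemma bestK_match (prev new_tail : List String) : ∀ m,
    new_tail.take (bestK prev new_tail m)
      = prev.drop (prev.length - bestK prev new_tail m) := by
  intro m; induction m with
  | zero => simp [bestK]
  | succ k ih =>
      simp only [bestK]; split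
      · assumption
      · exact ih

lemma bestK_ge (prev new_tail : List String) : ∀ m j,
    j ≤ m → new_tail.take j = prev.drop (prev.length - j) → j ≤ bestK prev new_tail m := by
  intro m; induction m with
  | zero => intro j h _; omega
  | succ k ih =>
      intro j hj hmatch
      simp only [bestK]; split
      · omega
      · rcases Nat.lt_or_ge j (k + 1) with h | h
        · exact ih j (by omega) hmatch
        · have : j = k + 1 := by omega
          subst this; simp_all

-- the two maxima coincide
lemma maxBorder_eq_bestK (prev new_tail : List String) :
    maxBorder (cnlSeq prev new_tail)
      = bestK prev new_tail (min prev.length new_tail.length) := by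
  have hlen := cnlSeq_length prev new_tail
  apply Nat.le_antisymm
  · have hb := mbAux_bord (cnlSeq prev new_tail) ((cnlSeq prev new_tail).length - 1)
    have hle := mbAux_le (cnlSeq prev new_tail) ((cnlSeq prev new_tail).length - 1)
    have hlt : maxBorder (cnlSeq prev new_tail) < (cnlSeq prev new_tail).length := by
      unfold maxBorder
      omega
    obtain ⟨h1, h2, h3⟩ := (bord_seq_iff prev new_tail _ hlt).mp hb
    exact bestK_ge prev new_tail _ _ (by omega) h3
  · have h3 := bestK_match prev new_tail (min prev.length new_tail.length)
    have hle := bestK_le prev new_tail (min prev.length new_tail.length)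
    have hlt : bestK prev new_tail (min prev.length new_tail.length)
        < (cnlSeq prev new_tail).length := by omega
    have hb := (bord_seq_iff prev new_tail _ hlt).mpr ⟨by omega, by omega, h3⟩
    exact mbAux_ge _ _ _ hb (by omega)

-- B's whole computation returns new_tail minus the longest border of the joined sequence
lemma alt_eq_drop_maxBorder (prev new_tail : List String) :
    compute_new_lines_py_alt prev new_tail
      = new_tail.drop (maxBorder (cnlSeq prev new_tail)) := by
  have hlen := cnlSeq_length prev new_tail
  have hne : cnlSeq prev new_tail ≠ [] := by
    intro h
    rw [h] at hlen
    simp at hlen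
    omega
  show new_tail.drop (kmpLoop (cnlSeq prev new_tail) (cnlSeq prev new_tail).tail [0] 0) = _
  congr 1
  have htail : (cnlSeq prev new_tail).tail = (cnlSeq prev new_tail).drop 1 :=
    List.drop_one.symm
  have hmb1 : maxBorder ((cnlSeq prev new_tail).take 1) = 0 := by
    have : ((cnlSeq prev new_tail).take 1).length = 1 := by simp; omega
    unfold maxBorder
    rw [this]
    rfl
  have hpi1 : (List.range 1).map (fun j => maxBorder ((cnlSeq prev new_tail).take (j + 1)))
      = [0] := by
    simp [List.range_succ, hmb1]
  have := kmpInv (cnlSeq prev new_tail) ((cnlSeq prev new_tail).length - 1) 1 (by omega)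
    (le_refl _) (by omega)
  rw [hpi1, hmb1] at this
  rw [htail]
  exact this

-- ===== VERDICT (by name: the statement is the Claim_ definition above) =====
theorem compute_new_lines_py_spec : Claim_equal_compute_new_lines_py := by
  intro prev_tail new_tail _
  unfold Spec_compute_new_lines_py
  rw [alt_eq_drop_maxBorder, maxBorder_eq_bestK]
  unfold compute_new_lines_py
  by_cases hp : prev_tail = []
  · subst hp
    simp [bestK]
  · rw [if_neg hp]
    have hmin : min (prev_tail.length : Int) (new_tail.length : Int)
        = ((min prev_tail.length new_tail.length : Nat) : Int) := by push_cast; rfl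
    simp only [hmin]
    exact loopA_eq_bestK prev_tail new_tail (min prev_tail.length new_tail.length)
      (Nat.min_le_left _ _) (Nat.min_le_right _ _)
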